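-- pv_equiv track=rewrite | github.com/omkarbhabad99/cis6930sp24-assignment2 | assignment2.py | calculate_location_rank
-- ===== SOURCE A (Python) =====
-- from collections import Counter # A container that keeps count of hashable objects
-- from collections import Counter
--
-- def calculate_location_rank(locations):
--
--     # Count the occurrences of each location
--     location_counter = Counter(locations)
--
--     # Sort locations by frequency (descending) and then alphabetically
--     sorted_locations = sorted(location_counter.items(), key=lambda x: (-x[1], x[0]))
--
--     location_ranks = {}
--     current_rank = 1
--     prev_count = -1  # Initialize with an impossible count
--     same_rank_counter = 1  # Counts how many locations have the same rank for skipping after a tie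
--
--     for location, count in sorted_locations:
--         if count != prev_count:
--             current_rank = same_rank_counter
--             prev_count = count
--         location_ranks[location] = current_rank
--         same_rank_counter += 1  # Always increment this, as it determines the next rank after a tie
--
--     return location_ranks
-- ===== SOURCE B (Python) =====
-- from collections import Counter
--
-- def calculate_location_rank(locations):
--     counts = Counter(locations)
--     neg = sorted(-v for v in counts.values())
--
--     def rank_of(c):
--         # 1 + number of counts strictly greater than c, found by binary search
--         lo, hi = 0, len(neg)
--         while lo < hi:
--             mid = (lo + hi) // 2
--             if neg[mid] < -c:
--                 lo = mid + 1
--             else: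
--                 hi = mid
--         return 1 + lo
--
--     return {loc: rank_of(c)
--             for loc, c in sorted(counts.items(), key=lambda x: (-x[1], x[0]))}
-- ===== Notes on version B (the rewrite author's own statement) =====
-- stated objective: alternative
-- what changed: A assigns competition ranks by a sequential scan with sentinel state (current_rank/prev_count/same_rank_counter); B has no rank state at all: it sorts the negated counts once and computes each location's rank independently as 1 + (binary-searched number of counter values strictly greater than its own count), emitted in the same sorted order.
import Mathlib
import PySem

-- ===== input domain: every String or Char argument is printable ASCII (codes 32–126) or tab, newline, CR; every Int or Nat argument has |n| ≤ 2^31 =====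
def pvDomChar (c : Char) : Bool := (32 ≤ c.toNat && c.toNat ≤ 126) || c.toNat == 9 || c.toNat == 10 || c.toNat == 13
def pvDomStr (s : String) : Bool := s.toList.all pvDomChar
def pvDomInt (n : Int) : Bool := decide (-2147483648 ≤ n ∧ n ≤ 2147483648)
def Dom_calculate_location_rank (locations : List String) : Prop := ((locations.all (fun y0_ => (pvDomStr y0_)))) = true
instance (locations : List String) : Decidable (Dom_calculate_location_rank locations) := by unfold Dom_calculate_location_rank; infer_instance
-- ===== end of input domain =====

-- B drops A's sequential tie-tracking state entirely: each location's rank is computed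
-- independently as 1 + the number of counter values strictly greater than its own count
-- (objective: alternative algorithm, similar cost).


-- ===== PORT A =====
def calculate_location_rank (locations : List String) : List (String × Int) :=
  let location_counter := PySem.Dict.counter locations
  let sorted_locations := PySem.List.sorted2 location_counter.items
      (fun x => -x.2) (fun x => x.1) false
  -- state: (location_ranks, current_rank, prev_count, same_rank_counter)
  let st := sorted_locations.foldl
    (fun (st : PySem.Dict String Int × Int × Int × Int) p =>
      let (location_ranks, current_rank, prev_count, same_rank_counter) := st
      let (current_rank, prev_count) :=
        if p.2 ≠ prev_count then (same_rank_counter, p.2) else (current_rank, prev_count)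
      (location_ranks.insert p.1 current_rank, current_rank, prev_count, same_rank_counter + 1))
    (PySem.Dict.empty, 1, -1, 1)
  st.1.items

-- ===== PORT B =====
-- rank_of's while loop: binary search for the number of elements of neg below x
-- (neg[mid] is in range whenever lo < hi ≤ len, so getD's default is never used)
def nlessAux (neg : List Int) (x : Int) (lo hi : Nat) : Nat :=
  if _h : lo < hi then
    let mid := (lo + hi) / 2
    if neg.getD mid 0 < x then nlessAux neg x (mid + 1) hi
    else nlessAux neg x lo mid
  else lo
  termination_by hi - lo
  decreasing_by all_goals omega

-- dict comprehension: each sorted item gets rank 1 + (binary-searched count of greater values)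
def calculate_location_rank_alt (locations : List String) : List (String × Int) :=
  let counts := PySem.Dict.counter locations
  let neg := PySem.List.sorted (counts.values.map (fun v => -v)) (fun x => x) false
  ((PySem.List.sorted2 counts.items (fun x => -x.2) (fun x => x.1) false).foldl
    (fun (d : PySem.Dict String Int) p =>
      d.insert p.1 (1 + ((nlessAux neg (-p.2) 0 neg.length) : Int)))
    PySem.Dict.empty).items

-- ===== PRECONDITION & SPEC =====
def Spec_calculate_location_rank (locations : List String) (out : List (String × Int)) : Prop := out = calculate_location_rank_alt locations
instance (locations : List String) (out : List (String × Int)) : Decidable (Spec_calculate_location_rank locations out) := by unfold Spec_calculate_location_rank; infer_instance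

-- ===== CLAIM (what is proved, stated in full; the proofs are below) =====
def Claim_equal_calculate_location_rank : Prop := ∀ (locations : List String), Dom_calculate_location_rank locations → Spec_calculate_location_rank locations (calculate_location_rank locations)

-- ===== LEMMAS AND PROOFS =====

-- Pure description of A's ranking loop (dict dropped; it only appends fresh keys).
def specList : List (String × Int) → Int → Int → Int → List (String × Int)
  | [], _, _, _ => []
  | (l, c) :: rest, cur, prev, same =>
      let cur' := if c ≠ prev then same else cur
      (l, cur') :: specList rest cur' c (same + 1)

def foldA (xs : List (String × Int)) (st : PySem.Dict String Int × Int × Int × Int) :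
    PySem.Dict String Int × Int × Int × Int :=
  xs.foldl
    (fun (st : PySem.Dict String Int × Int × Int × Int) p =>
      let (d, cur, prev, same) := st
      let (cur, prev) := if p.2 ≠ prev then (same, p.2) else (cur, prev)
      (d.insert p.1 cur, cur, prev, same + 1)) st

lemma foldA_items (xs : List (String × Int)) :
    ∀ (d : PySem.Dict String Int) cur prev same,
    (∀ p ∈ xs, d.contains p.1 = false) → (xs.map (·.1)).Nodup →
    (foldA xs (d, cur, prev, same)).1.items = d.items ++ specList xs cur prev same := by
  induction xs with
  | nil => intro d cur prev same _ _; simp [foldA, specList]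
  | cons p rest ih =>
      intro d cur prev same hfresh hnd
      obtain ⟨l, c⟩ := p
      have hdl : d.contains l = false := hfresh (l, c) (by simp)
      simp only [List.map_cons, List.nodup_cons] at hnd
      have hfresh' : ∀ v, ∀ q ∈ rest, (d.insert l v).contains q.1 = false := by
        intro v q hq
        rw [PySem.Dict.contains_insert]
        have : ¬ q.1 = l := by
          intro h; exact hnd.1 (h ▸ (List.mem_map.mpr ⟨q, hq, rfl⟩))
        simp [this, hfresh q (List.mem_cons_of_mem _ hq)]
      by_cases hc : c ≠ prev
      · have hrec := ih (d.insert l same) same c (same + 1) (hfresh' same) hnd.2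
        simp only [foldA, List.foldl_cons, specList, if_pos hc] at *
        rw [hrec, PySem.Dict.items_insert_of_not_contains _ _ hdl]
        simp
      · rw [not_ne_iff] at hc
        subst hc
        have hrec := ih (d.insert l cur) cur c (same + 1) (hfresh' cur) hnd.2
        simp only [foldA, List.foldl_cons, specList,
          if_neg (show ¬ (c ≠ c) by simp)] at *
        rw [hrec, PySem.Dict.items_insert_of_not_contains _ _ hdl]
        simp

-- B's fold over fresh keys is an append of the mapped list.
lemma items_foldl_insert (f : String × Int → Int) :
    ∀ (xs : List (String × Int)) (d : PySem.Dict String Int),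
    (∀ p ∈ xs, d.contains p.1 = false) → (xs.map (·.1)).Nodup →
    (xs.foldl (fun d p => d.insert p.1 (f p)) d).items
      = d.items ++ xs.map (fun p => (p.1, f p)) := by
  intro xs
  induction xs with
  | nil => intro d _ _; simp
  | cons p rest ih =>
      intro d hfresh hnd
      have hdl : d.contains p.1 = false := hfresh p (by simp)
      simp only [List.map_cons, List.nodup_cons] at hnd
      have hfresh' : ∀ q ∈ rest, (d.insert p.1 (f p)).contains q.1 = false := by
        intro q hq
        rw [PySem.Dict.contains_insert]
        have : ¬ q.1 = p.1 := by
          intro h; exact hnd.1 (h ▸ (List.mem_map.mpr ⟨q, hq, rfl⟩))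
        simp [this, hfresh q (List.mem_cons_of_mem _ hq)]
      rw [List.foldl_cons, ih _ hfresh' hnd.2,
        PySem.Dict.items_insert_of_not_contains _ _ hdl]
      simp

-- a run of equal counts inside specList
lemma specList_run (grp : List (String × Int)) (c : Int) :
    ∀ rest' r same, (∀ p ∈ grp, p.2 = c) →
    specList (grp ++ rest') r c same =
      grp.map (fun p => (p.1, r)) ++ specList rest' r c (same + grp.length) := by
  induction grp with
  | nil => intro rest' r same _; simp
  | cons p grp ih =>
      intro rest' r same hall
      obtain ⟨l, cc⟩ := p
      have hcc : cc = c := hall (l, cc) (by simp)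
      subst hcc
      simp only [List.cons_append, specList, ne_eq, not_true_eq_false, if_false]
      rw [ih rest' r (same + 1) (fun q hq => hall q (List.mem_cons_of_mem _ hq))]
      simp only [List.map_cons, List.cons_append, List.length_cons]
      congr 3
      omega

lemma head_dropWhile {α : Type} (p : α → Bool) :
    ∀ (xs : List α) y ys, xs.dropWhile p = y :: ys → p y = false := by
  intro xs y ys h
  induction xs with
  | nil => simp [List.dropWhile] at h
  | cons x xs ih =>
      rw [List.dropWhile_cons] at h
      split at h
      · exact ih h
      · cases h; simp_all

-- ----- sortedness of A/B's shared sort, as a Pairwise fact -----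
def pvBefore (a b : String × Int) : Bool :=
  decide ((-a.2) < (-b.2)) || (!decide ((-b.2) < (-a.2)) && decide (a.1 < b.1))

lemma pvBefore_asymm (a b : String × Int) :
    pvBefore a b = true → pvBefore b a = false := by
  simp only [pvBefore, Bool.or_eq_true, Bool.and_eq_true, Bool.not_eq_true',
    decide_eq_true_eq, decide_eq_false_iff_not, Bool.or_eq_false_iff,
    Bool.and_eq_false_iff, Bool.not_eq_false', decide_eq_true_eq]
  rintro (h | ⟨h1, h2⟩)
  · exact ⟨by omega, Or.inl (by omega)⟩
  · exact ⟨h1, Or.inr (lt_asymm h2)⟩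

lemma pvBefore_negTrans (a b c : String × Int) :
    pvBefore b a = false → pvBefore c b = false → pvBefore c a = false := by
  simp only [pvBefore, Bool.or_eq_false_iff, Bool.and_eq_false_iff,
    decide_eq_false_iff_not, Bool.not_eq_false', decide_eq_true_eq]
  rintro ⟨h1, h2⟩ ⟨h3, h4⟩
  refine ⟨by omega, ?_⟩
  rcases h2 with h2 | h2
  · exact Or.inl (by omega)
  rcases h4 with h4 | h4
  · exact Or.inl (by omega)
  · exact Or.inr (not_lt.mpr (le_trans (not_lt.mp h2) (not_lt.mp h4)))

lemma insertBy_pairwise (x : String × Int) :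
    ∀ l : List (String × Int), (l.Pairwise fun a b => pvBefore b a = false) →
    ((PySem.List.insertBy pvBefore x l).Pairwise fun a b => pvBefore b a = false) := by
  intro l
  induction l with
  | nil => intro _; simp [PySem.List.insertBy]
  | cons y ys ih =>
      intro h
      rw [PySem.List.insertBy]
      by_cases hxy : pvBefore x y = true
      · rw [if_pos hxy]
        refine List.Pairwise.cons ?_ h
        intro z hz
        rcases List.mem_cons.mp hz with rfl | hz
        · exact pvBefore_asymm _ _ hxy
        · exact pvBefore_negTrans _ _ _ (pvBefore_asymm _ _ hxy) (List.rel_of_pairwise_cons h hz)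
      · rw [if_neg hxy]
        refine List.Pairwise.cons ?_ (ih h.tail)
        intro z hz
        rcases (PySem.List.mem_insertBy pvBefore x z ys).mp hz with rfl | hz
        · simpa using hxy
        · exact List.rel_of_pairwise_cons h hz

lemma sorted2_counts_antitone (items : List (String × Int)) :
    (PySem.List.sorted2 items (fun x => -x.2) (fun x => x.1) false).Pairwise
      (fun a b => b.2 ≤ a.2) := by
  have key : ∀ (xs acc : List (String × Int)),
      (acc.Pairwise fun a b => pvBefore b a = false) →
      ((xs.foldl (fun acc x => PySem.List.insertBy pvBefore x acc) acc).Pairwise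
        fun a b => pvBefore b a = false) := by
    intro xs
    induction xs with
    | nil => intro acc h; simpa using h
    | cons x xs ih =>
        intro acc h
        exact ih _ (insertBy_pairwise x acc h)
  have heq : PySem.List.sorted2 items (fun x => -x.2) (fun x => x.1) false
      = items.foldl (fun acc x => PySem.List.insertBy pvBefore x acc) [] := rfl
  rw [heq]
  refine (key items [] (by simp)).imp ?_
  intro a b hab
  simp only [pvBefore, Bool.or_eq_false_iff, decide_eq_false_iff_not] at hab
  omega

-- ----- the central lemma: A's scan equals B's counting formula on a sorted list -----
lemma specList_eq_rank (F : List Int) :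
    ∀ n (xs : List (String × Int)) prev (pos cur : Int),
    xs.length ≤ n →
    xs.Pairwise (fun a b => b.2 ≤ a.2) →
    (∀ y ys, xs = y :: ys → y.2 ≠ prev) →
    (∀ q ∈ xs, ((F.countP (fun v => q.2 < v)) : Int)
        = pos + (((xs.map (fun p => p.2)).countP (fun v => q.2 < v)) : Int)) →
    specList xs cur prev (pos + 1)
      = xs.map (fun p => (p.1, 1 + ((F.countP (fun v => p.2 < v)) : Int))) := by
  intro n
  induction n with
  | zero =>
      intro xs prev pos cur hlen _ _ _
      have : xs = [] := List.eq_nil_of_length_eq_zero (Nat.le_zero.mp hlen)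
      subst this; simp [specList]
  | succ n ih =>
      intro xs prev pos cur hlen hpw hhead hF
      cases xs with
      | nil => simp [specList]
      | cons p rest =>
          obtain ⟨l, c⟩ := p
          have hne : c ≠ prev := hhead (l, c) rest rfl
          have hle_c : ∀ q ∈ rest, q.2 ≤ c :=
            fun q hq => List.rel_of_pairwise_cons hpw hq
          -- every element of the whole list has count ≤ c
          have hall_le : ∀ v ∈ ((l, c) :: rest).map (fun p => p.2), v ≤ c := by
            intro v hv
            rcases List.mem_map.mp hv with ⟨q, hq, rfl⟩
            rcases List.mem_cons.mp hq with rfl | hq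
            · exact le_refl _
            · exact hle_c q hq
          have hcountc : ((F.countP (fun v => c < v)) : Int) = pos := by
            have h0 : (((l, c) :: rest).map (fun p => p.2)).countP (fun v => c < v) = 0 :=
              List.countP_eq_zero.mpr (fun v hv => by
                simpa using not_lt_of_ge (hall_le v hv))
            have := hF (l, c) (by simp)
            rw [h0] at this
            simpa using this
          have hsplit : rest = rest.takeWhile (fun p => p.2 == c)
              ++ rest.dropWhile (fun p => p.2 == c) :=
            (List.takeWhile_append_dropWhile).symm
          set grp := rest.takeWhile (fun p => p.2 == c) with hgrp
          set rest' := rest.dropWhile (fun p => p.2 == c) with hrest'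
          have hall : ∀ q ∈ grp, q.2 = c := by
            intro q hq
            have := List.mem_takeWhile_imp hq
            simpa using this
          have hmem_rest' : ∀ q ∈ rest', q ∈ rest := by
            intro q hq; rw [hsplit]; exact List.mem_append_right _ hq
          -- all counts after the run are strictly below c
          have hlt : ∀ q ∈ rest', q.2 < c := by
            intro q hq
            cases hr : rest' with
            | nil => rw [hr] at hq; cases hq
            | cons f tail =>
                have hf_ne : f.2 ≠ c := by
                  have := head_dropWhile (fun p => p.2 == c) rest f tail (hrest' ▸ hr)
                  simpa using this
                have hf_le : f.2 ≤ c := hle_c f (hmem_rest' f (hr ▸ List.mem_cons_self))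
                have hf_lt : f.2 < c := lt_of_le_of_ne hf_le hf_ne
                rw [hr] at hq
                rcases List.mem_cons.mp hq with rfl | hq
                · exact hf_lt
                · have hpw' : rest'.Pairwise (fun a b => b.2 ≤ a.2) :=
                    hpw.tail.sublist (hrest' ▸ List.dropWhile_sublist _)
                  rw [hr] at hpw'
                  exact lt_of_le_of_lt (List.rel_of_pairwise_cons hpw' hq) hf_lt
          -- unfold one step of specList, then the run
          simp only [specList, if_pos hne]
          conv_lhs => rw [hsplit]
          rw [specList_run grp c rest' (pos + 1) (pos + 1 + 1) hall]
          -- recursive call on rest'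
          have hlen' : rest'.length ≤ n := by
            have h1 := List.length_dropWhile_le (fun p => p.2 == c) rest
            rw [hrest']
            simp only [List.length_cons] at hlen
            omega
          have hpw'' : rest'.Pairwise (fun a b => b.2 ≤ a.2) :=
            hpw.tail.sublist (hrest' ▸ List.dropWhile_sublist _)
          have hh' : ∀ y ys, rest' = y :: ys → y.2 ≠ c := by
            intro y ys h
            have hd : rest.dropWhile (fun p => p.2 == c) = y :: ys := by
              rw [← hrest']; exact h
            have := head_dropWhile (fun p => p.2 == c) rest y ys hd
            simpa using this
          have hF' : ∀ q ∈ rest', ((F.countP (fun v => q.2 < v)) : Int)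
              = (pos + 1 + grp.length)
                + (((rest'.map (fun p => p.2)).countP (fun v => q.2 < v)) : Int) := by
            intro q hq
            have hqc : q.2 < c := hlt q hq
            have hqx := hF q (List.mem_cons_of_mem _ (hmem_rest' q hq))
            have hmapsplit : ((l, c) :: rest).map (fun p => p.2)
                = c :: (grp.map (fun p => p.2) ++ rest'.map (fun p => p.2)) := by
              rw [hsplit]; simp
            rw [hmapsplit] at hqx
            have hgrpfull : (grp.map (fun p => p.2)).countP (fun v => q.2 < v)
                = grp.length := by
              rw [List.countP_eq_length.mpr, List.length_map]
              intro v hv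
              rcases List.mem_map.mp hv with ⟨g, hg, rfl⟩
              simpa using lt_of_lt_of_eq hqc (hall g hg).symm
            rw [List.countP_cons, List.countP_append, hgrpfull] at hqx
            simp only [decide_eq_true_eq, if_pos hqc] at hqx
            rw [hqx]
            push_cast
            ring
          have hrec := ih rest' c (pos + 1 + grp.length) (pos + 1) hlen' hpw'' hh' hF'
          have harg : (pos + 1 + 1 + (grp.length : Int)) = (pos + 1 + grp.length) + 1 := by
            ring
          rw [harg, hrec]
          -- now compare the two maps, group by group
          rw [hsplit]
          simp only [List.map_cons, List.map_append]
          congr 1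
          · simp [hcountc]; ring
          congr 1
          · apply List.map_congr_left
            intro g hg
            rw [hall g hg, hcountc]
            ring_nf

lemma nodup_keys_sorted (locations : List String) :
    ((PySem.List.sorted2 (PySem.Dict.counter locations).items
        (fun x => -x.2) (fun x => x.1) false).map (·.1)).Nodup := by
  have hperm : (PySem.List.sorted2 (PySem.Dict.counter locations).items
      (fun x => -x.2) (fun x => x.1) false).Perm (PySem.Dict.counter locations).items :=
    PySem.List.sorted2_perm _ _ _ _
  have hnd : ((PySem.Dict.counter locations).items.map (·.1)).Nodup := by
    have := PySem.Dict.nodup_keys_counter (κ := String) locations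
    simpa [PySem.Dict.keys] using this
  exact (List.Perm.map (·.1) hperm.symm).nodup hnd

-- ----- binary search counts the elements below x in a sorted list -----
lemma countP_eq_of_prefix (x : Int) :
    ∀ (neg : List Int) (lo : Nat), lo ≤ neg.length →
    (∀ j (h : j < neg.length), neg[j] < x ↔ j < lo) →
    neg.countP (fun v => v < x) = lo := by
  intro neg
  induction neg with
  | nil => intro lo h _; simpa using (Nat.le_zero.mp h).symm
  | cons a t ih =>
      intro lo hlo hiff
      cases lo with
      | zero =>
          have ha : ¬ a < x := by simpa using (hiff 0 (by simp)).not
          have ht : t.countP (fun v => v < x) = 0 := by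
            apply ih 0 (by omega)
            intro j hj
            simpa using (hiff (j + 1) (by simpa using Nat.succ_lt_succ hj)).not
          simp [ha, ht]
      | succ m =>
          have ha : a < x := (hiff 0 (by simp)).mpr (Nat.succ_pos m)
          have ht : t.countP (fun v => v < x) = m := by
            apply ih m (by simpa using Nat.lt_succ_iff.mp (Nat.lt_of_lt_of_le (Nat.lt_succ_self m) hlo))
            intro j hj
            have := hiff (j + 1) (by simpa using Nat.succ_lt_succ hj)
            simpa [Nat.succ_lt_succ_iff] using this
          simp [ha, ht]

lemma countP_boundary (neg : List Int) (x : Int) (lo : Nat) (hlo : lo ≤ neg.length)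
    (hpre : ∀ j (h : j < neg.length), j < lo → neg[j] < x)
    (hsuf : ∀ j (h : j < neg.length), lo ≤ j → ¬ neg[j] < x) :
    neg.countP (fun v => v < x) = lo := by
  apply countP_eq_of_prefix x neg lo hlo
  intro j hj
  constructor
  · intro h
    by_contra hge
    exact hsuf j hj (Nat.le_of_not_lt hge) h
  · exact hpre j hj

lemma nlessAux_eq (neg : List Int) (x : Int) (hs : neg.Pairwise (· ≤ ·)) :
    ∀ (n lo hi : Nat), hi - lo ≤ n → lo ≤ hi → hi ≤ neg.length →
    (∀ j (h : j < neg.length), j < lo → neg[j] < x) →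
    (∀ j (h : j < neg.length), hi ≤ j → ¬ neg[j] < x) →
    nlessAux neg x lo hi = neg.countP (fun v => v < x) := by
  have hmono := List.pairwise_iff_getElem.mp hs
  intro n
  induction n with
  | zero =>
      intro lo hi hn hlohi hhi hpre hsuf
      have heq : lo = hi := by omega
      rw [nlessAux, dif_neg (by omega)]
      subst heq
      exact (countP_boundary neg x lo (le_trans hlohi hhi) hpre hsuf).symm
  | succ n ih =>
      intro lo hi hn hlohi hhi hpre hsuf
      rw [nlessAux]
      by_cases hlt : lo < hi
      · rw [dif_pos hlt]
        have hmidlen : (lo + hi) / 2 < neg.length := by omega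
        have hD : neg.getD ((lo + hi) / 2) 0 = neg[(lo + hi) / 2] :=
          List.getD_eq_getElem neg 0 hmidlen
        simp only [hD]
        by_cases hx : neg[(lo + hi) / 2] < x
        · rw [if_pos hx]
          apply ih ((lo + hi) / 2 + 1) hi (by omega) (by omega) hhi
          · intro j hj hjlt
            rcases Nat.lt_succ_iff_lt_or_eq.mp hjlt with hjlt | rfl
            · rcases Nat.lt_or_ge j lo with hjlo | hjlo
              · exact hpre j hj hjlo
              · exact lt_of_le_of_lt (hmono j ((lo + hi) / 2) hj hmidlen hjlt) hx
            · exact hx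
          · exact hsuf
        · rw [if_neg hx]
          apply ih lo ((lo + hi) / 2) (by omega) (by omega) (by omega) hpre
          intro j hj hjge hcon
          rcases Nat.eq_or_lt_of_le hjge with rfl | hjgt
          · exact hx hcon
          · exact hx (lt_of_le_of_lt (hmono ((lo + hi) / 2) j hmidlen hj hjgt) hcon)
      · rw [dif_neg hlt]
        have heq : lo = hi := by omega
        subst heq
        exact (countP_boundary neg x lo (by omega) hpre hsuf).symm

-- ===== VERDICT (by name: the statement is the Claim_ definition above) =====
theorem calculate_location_rank_spec : Claim_equal_calculate_location_rank := by
  intro locations _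
  unfold Spec_calculate_location_rank calculate_location_rank calculate_location_rank_alt
  set xs := PySem.List.sorted2 (PySem.Dict.counter locations).items
      (fun x => -x.2) (fun x => x.1) false with hxs
  have hnd := nodup_keys_sorted locations
  have h1 : (foldA xs (PySem.Dict.empty, 1, -1, 1)).1.items =
      PySem.Dict.empty.items ++ specList xs 1 (-1) 1 := by
    apply foldA_items
    · intro p _; exact PySem.Dict.contains_empty _
    · exact hnd
  set neg := PySem.List.sorted ((PySem.Dict.counter locations).values.map (fun v => -v))
      (fun x => x) false with hneg
  have h2 : (xs.foldl (fun d p => d.insert p.1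
        (1 + ((nlessAux neg (-p.2) 0 neg.length) : Int)))
        PySem.Dict.empty).items
      = PySem.Dict.empty.items
        ++ xs.map (fun p => (p.1, 1 + ((nlessAux neg (-p.2) 0 neg.length) : Int))) := by
    apply items_foldl_insert
    · intro p _; exact PySem.Dict.contains_empty _
    · exact hnd
  have hbis : ∀ c : Int, nlessAux neg (-c) 0 neg.length
      = (PySem.Dict.counter locations).values.countP (fun v => c < v) := by
    intro c
    have hs : neg.Pairwise (· ≤ ·) := by
      have := PySem.List.sorted_pairwise
        ((PySem.Dict.counter locations).values.map (fun v => -v)) (fun x => x)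
      simpa [hneg] using this
    rw [nlessAux_eq neg (-c) hs neg.length 0 neg.length (by omega) (by omega) le_rfl
      (by intro j hj h; omega) (by intro j hj h h2; omega)]
    have hperm : neg.Perm ((PySem.Dict.counter locations).values.map (fun v => -v)) :=
      PySem.List.sorted_perm _ _ false
    rw [hperm.countP_eq, List.countP_map]
    apply List.countP_congr
    intro v _
    simp only [Function.comp_apply, decide_eq_true_eq]
    omega
  have hpermvals : (xs.map (fun p => p.2)).Perm (PySem.Dict.counter locations).values := by
    have hperm : xs.Perm (PySem.Dict.counter locations).items :=
      PySem.List.sorted2_perm _ _ _ _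
    exact hperm.map (fun p => p.2)
  have h3 : specList xs 1 (-1) (0 + 1)
      = xs.map (fun p => (p.1,
          1 + (((PySem.Dict.counter locations).values.countP (fun v => p.2 < v)) : Int))) := by
    apply specList_eq_rank _ xs.length xs (-1) 0 1 le_rfl
    · exact sorted2_counts_antitone _
    · intro y ys hy
      have hymem : y ∈ xs := by rw [hy]; simp
      have : y ∈ (PySem.Dict.counter locations).items :=
        (PySem.List.sorted2_perm _ _ _ _).subset hymem
      rw [PySem.Dict.items_counter] at this
      obtain ⟨k, hk, hky⟩ := List.mem_map.mp this
      have hcount : 0 < locations.count k := by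
        have : k ∈ locations := by
          have := hk
          rwa [PySem.Set.mem_ofList] at this
        exact List.count_pos_iff.mpr this
      intro hcontra
      rw [← hky] at hcontra
      simp only at hcontra
      omega
    · intro q _
      rw [hpermvals.countP_eq]
      simp
  show (foldA xs (PySem.Dict.empty, 1, -1, 1)).1.items = _
  rw [h1]
  show _ = (xs.foldl (fun d p => d.insert p.1
        (1 + ((nlessAux neg (-p.2) 0 neg.length) : Int)))
        PySem.Dict.empty).items
  rw [h2]
  have hmaps : xs.map (fun p => (p.1, 1 + ((nlessAux neg (-p.2) 0 neg.length) : Int)))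
      = xs.map (fun p => (p.1,
          1 + (((PySem.Dict.counter locations).values.countP (fun v => p.2 < v)) : Int))) := by
    apply List.map_congr_left
    intro p _
    rw [hbis p.2]
  rw [hmaps]
  have : specList xs 1 (-1) 1 = specList xs 1 (-1) (0 + 1) := by norm_num
  rw [this, h3]
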